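-- pv_equiv track=rewrite | github.com/eloqlo/Code_Interview | SAMSUNG_2/2023_1_morn.py | find_weak_strong
-- ===== SOURCE A (Python) =====
-- def find_weak_strong(A, B):
--     low_atk = 1e6
--     low_atk_recent_turn = None
--     low_atk_rpc = None
--     low_atk_col = None
--
--     high_atk = -1
--     high_atk_old_turn = None
--     high_atk_rpc = None
--     high_atk_col = None
--
--     wr, wc = None, None
--     sr, sc = None, None
--
--     for r in range(len(A)):
--         for c in range(len(A[0])):
--             if A[r][c] > 0:
--                 if A[r][c] > high_atk:
--                     high_atk = A[r][c]
--                     high_atk_old_turn = B[r][c]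
--                     high_atk_rpc = r + c
--                     high_atk_col = c
--                     sr, sc = r, c
--                 elif A[r][c] == high_atk:
--                     if B[r][c] < high_atk_old_turn:
--                         high_atk = A[r][c]
--                         high_atk_old_turn = B[r][c]
--                         high_atk_rpc = r + c
--                         high_atk_col = c
--                         sr, sc = r, c
--                     elif B[r][c] == high_atk_old_turn:
--                         if r + c < high_atk_rpc:
--                             high_atk = A[r][c]
--                             high_atk_old_turn = B[r][c]
--                             high_atk_rpc = r + c
--                             high_atk_col = c
--                             sr, sc = r, c
--                         elif r + c == high_atk_rpc:
--                             if c < high_atk_col: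
--                                 high_atk = A[r][c]
--                                 high_atk_old_turn = B[r][c]
--                                 high_atk_rpc = r + c
--                                 high_atk_col = c
--                                 sr, sc = r, c
--
--                 if A[r][c] < low_atk:
--                     low_atk = A[r][c]
--                     low_atk_recent_turn = B[r][c]
--                     low_atk_rpc = r + c
--                     low_atk_col = c
--                     wr, wc = r, c
--                 elif A[r][c] == low_atk:
--                     if B[r][c] > low_atk_recent_turn:
--                         low_atk = A[r][c]
--                         low_atk_recent_turn = B[r][c]
--                         low_atk_rpc = r + c
--                         low_atk_col = c
--                         wr, wc = r, c
--                     elif B[r][c] == low_atk_recent_turn: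
--                         if low_atk_rpc < r + c:
--                             low_atk = A[r][c]
--                             low_atk_recent_turn = B[r][c]
--                             low_atk_rpc = r + c
--                             low_atk_col = c
--                             wr, wc = r, c
--                         elif low_atk_rpc == r + c:
--                             if low_atk_col < c:
--                                 low_atk = A[r][c]
--                                 low_atk_recent_turn = B[r][c]
--                                 low_atk_rpc = r + c
--                                 low_atk_col = c
--                                 wr, wc = r, c
--
--     return wr, wc, sr, sc
-- ===== SOURCE B (Python) =====
-- def find_weak_strong(A, B):
--     cand = sorted((-A[r][c], B[r][c], r + c, c, r)
--                   for r in range(len(A)) for c in range(len(A[0])) if A[r][c] > 0)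
--     if not cand:
--         return None, None, None, None
--     s, w = cand[0], cand[-1]
--     return w[4], w[3], s[4], s[3]
-- ===== Notes on version B (the rewrite author's own statement) =====
-- stated objective: simpler
-- what changed: Replaces the 12-variable nested-loop tournament with cascaded tie-break ifs by one sort of the positive-cell tuples (-A,B,r+c,c,r): both answers fall out of a single ordering, the strongest as the first element and the weakest as the last (the weak key is the exact componentwise negation of the strong key and keys are unique per cell).
-- intended difference: On grids whose positive cells all exceed 10^6, A's float sentinel low_atk=1e6 silently ignores every cell for the weakest tournament and A returns (None, None) for the weakest while still reporting a strongest; B returns the actual weakest cell, the intended behaviour. — e.g. on find_weak_strong([[2000000]], [[1]]): A returns (none, none, some 0, some 0), B returns (some 0, some 0, some 0, some 0)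
-- outside the precondition, e.g. on find_weak_strong([[5, 3, 4]], [[7, 8]]): A returns (0, 1, 0, 0), B raises IndexError
import Mathlib
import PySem

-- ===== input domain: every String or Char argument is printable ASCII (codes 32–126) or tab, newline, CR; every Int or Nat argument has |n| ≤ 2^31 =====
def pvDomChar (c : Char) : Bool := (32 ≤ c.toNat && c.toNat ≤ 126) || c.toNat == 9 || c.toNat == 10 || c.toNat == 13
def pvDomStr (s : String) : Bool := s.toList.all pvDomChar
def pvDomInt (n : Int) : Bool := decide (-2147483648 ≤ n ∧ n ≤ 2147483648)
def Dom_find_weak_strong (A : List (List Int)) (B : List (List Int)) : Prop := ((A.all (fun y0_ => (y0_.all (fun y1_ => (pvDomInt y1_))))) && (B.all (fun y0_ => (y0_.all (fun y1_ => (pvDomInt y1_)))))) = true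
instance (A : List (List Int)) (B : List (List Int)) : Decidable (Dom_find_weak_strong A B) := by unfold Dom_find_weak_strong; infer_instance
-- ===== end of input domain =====

-- B replaces A's 12-variable cascaded-if tournament by ONE sort of the positive-cell tuples and
-- reading the two ends (objective: simpler). Equivalence is about return values; neither mutates.

-- shared indexing helpers (Python A[r][c] / B[r][c]; the .getD defaults mark IndexError, excluded by Pre_)
def pvRow (M : List (List Int)) (r : Int) : List Int := (PySem.List.pyGet? M r).getD []
def pvCell (M : List (List Int)) (r c : Int) : Int := (PySem.List.pyGet? (pvRow M r) c).getD 0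

-- ===== PORT A =====
structure PvSt where
  lowAtk : Int
  lowRecent : Option Int
  lowRpc : Option Int
  lowCol : Option Int
  wr : Option Int
  wc : Option Int
  highAtk : Int
  highOld : Option Int
  highRpc : Option Int
  highCol : Option Int
  sr : Option Int
  sc : Option Int
deriving DecidableEq, Repr

-- one body of Python A's nested loop (the `match … | _ => s` arms are Python's TypeError
-- comparisons of an int with the None initializers — those inputs are excluded by Pre_)
def pvStepA (s : PvSt) (a b r c : Int) : PvSt :=
  if a > 0 then
    let s1 :=
      if a > s.highAtk then
        { s with highAtk := a, highOld := some b, highRpc := some (r + c), highCol := some c,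
                 sr := some r, sc := some c }
      else if a = s.highAtk then
        match s.highOld, s.highRpc, s.highCol with
        | some t, some q, some k =>
          if b < t then
            { s with highAtk := a, highOld := some b, highRpc := some (r + c), highCol := some c,
                     sr := some r, sc := some c }
          else if b = t then
            if r + c < q then
              { s with highAtk := a, highOld := some b, highRpc := some (r + c), highCol := some c,
                       sr := some r, sc := some c }
            else if r + c = q then
              if c < k then
                { s with highAtk := a, highOld := some b, highRpc := some (r + c), highCol := some c,
                         sr := some r, sc := some c }
              else s
            else s
          else s
        | _, _, _ => s
      else s
    if a < s1.lowAtk then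
      { s1 with lowAtk := a, lowRecent := some b, lowRpc := some (r + c), lowCol := some c,
                wr := some r, wc := some c }
    else if a = s1.lowAtk then
      match s1.lowRecent, s1.lowRpc, s1.lowCol with
      | some t, some q, some k =>
        if b > t then
          { s1 with lowAtk := a, lowRecent := some b, lowRpc := some (r + c), lowCol := some c,
                    wr := some r, wc := some c }
        else if b = t then
          if q < r + c then
            { s1 with lowAtk := a, lowRecent := some b, lowRpc := some (r + c), lowCol := some c,
                      wr := some r, wc := some c }
          else if q = r + c then
            if k < c then
              { s1 with lowAtk := a, lowRecent := some b, lowRpc := some (r + c), lowCol := some c,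
                        wr := some r, wc := some c }
            else s1
          else s1
        else s1
      | _, _, _ => s1
    else s1
  else s

-- low_atk = 1e6 ported as the Int 1000000: exact, every compared int is far below 2^53
def find_weak_strong (A : List (List Int)) (B : List (List Int)) :
    Option Int × Option Int × Option Int × Option Int :=
  let init : PvSt := ⟨1000000, none, none, none, none, none, -1, none, none, none, none, none⟩
  let fin := (PySem.List.pyRange 0 A.length 1).foldl
    (fun s r => (PySem.List.pyRange 0 ((pvRow A 0).length) 1).foldl
      (fun s c => pvStepA s (pvCell A r c) (pvCell B r c) r c) s) init
  (fin.wr, fin.wc, fin.sr, fin.sc)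

-- ===== PORT B =====
-- Python's lexicographic comparison of the 5-int tuples, as the sort key
def pvKey5 (x : Int × Int × Int × Int × Int) : Int ×ₗ (Int ×ₗ (Int ×ₗ (Int ×ₗ Int))) :=
  toLex (x.1, toLex (x.2.1, toLex (x.2.2.1, toLex (x.2.2.2.1, x.2.2.2.2))))

-- cand[0] / cand[-1] of Source B: first and last of the sorted candidate list
def pvPick (cand : List (Int × Int × Int × Int × Int)) :
    Option Int × Option Int × Option Int × Option Int :=
  match cand with
  | [] => (none, none, none, none)
  | s :: t =>
    let w := (s :: t).getLast (List.cons_ne_nil s t)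
    (some w.2.2.2.2, some w.2.2.2.1, some s.2.2.2.2, some s.2.2.2.1)

def find_weak_strong_alt (A : List (List Int)) (B : List (List Int)) :
    Option Int × Option Int × Option Int × Option Int :=
  pvPick (PySem.List.sorted
    ((PySem.List.pyRange 0 A.length 1).flatMap (fun r =>
      (PySem.List.pyRange 0 ((pvRow A 0).length) 1).flatMap (fun c =>
        let a := pvCell A r c
        if a > 0 then [(-a, pvCell B r c, r + c, c, r)] else [])))
    pvKey5 false)

-- ===== PRECONDITION & SPEC =====
-- Pre_ excludes exactly the raising inputs: rows shorter than row 0 (IndexError in both), the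
-- 1e6-sentinel TypeError of A, and grids where some positive cell of A lies outside B — there A
-- happens to read B only at tournament-improving cells (an artefact of the running maxima) while
-- B reads B at every positive cell and raises IndexError.
def Pre_find_weak_strong (A : List (List Int)) (B : List (List Int)) : Prop :=
  (∀ row ∈ A, (A.headD []).length ≤ row.length) ∧
  (∀ r ∈ List.range A.length, ∀ c ∈ List.range (A.headD []).length, 0 < pvCell A r c →
      r < B.length ∧ c < (pvRow B r).length) ∧
  (∀ r ∈ List.range A.length, ∀ c ∈ List.range (A.headD []).length, pvCell A r c = 1000000 →
      ∃ r' ∈ List.range A.length, ∃ c' ∈ List.range (A.headD []).length,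
        (r' < r ∨ (r' = r ∧ c' < c)) ∧ 0 < pvCell A r' c' ∧ pvCell A r' c' < 1000000)
instance (A : List (List Int)) (B : List (List Int)) : Decidable (Pre_find_weak_strong A B) := by
  unfold Pre_find_weak_strong; infer_instance

def pvWitness_find_weak_strong : List (List Int) × List (List Int) := ([[1, 2]], [[3, 4]])

-- On grids whose positive cells all exceed 10^6, A's float sentinel low_atk=1e6 silently ignores
-- every cell for the weakest tournament and A returns (None, None) for the weakest while still
-- reporting a strongest; B returns the actual weakest cell, the intended behaviour.
def D_find_weak_strong (A : List (List Int)) (B : List (List Int)) : Prop :=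
  (∃ r ∈ List.range A.length, ∃ c ∈ List.range (A.headD []).length, 0 < pvCell A r c) ∧
  (∀ r ∈ List.range A.length, ∀ c ∈ List.range (A.headD []).length, 0 < pvCell A r c → 1000000 < pvCell A r c)
instance (A : List (List Int)) (B : List (List Int)) : Decidable (D_find_weak_strong A B) := by
  unfold D_find_weak_strong; infer_instance

def Spec_find_weak_strong (A : List (List Int)) (B : List (List Int))
    (out : Option Int × Option Int × Option Int × Option Int) : Prop :=
  ¬ D_find_weak_strong A B → out = find_weak_strong_alt A B
instance (A : List (List Int)) (B : List (List Int))
    (out : Option Int × Option Int × Option Int × Option Int) :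
    Decidable (Spec_find_weak_strong A B out) := by unfold Spec_find_weak_strong; infer_instance

def pvDiffWitness_find_weak_strong : List (List Int) × List (List Int) := ([[2000000]], [[1]])
def pvDiffWitnessOut_find_weak_strong :
    (Option Int × Option Int × Option Int × Option Int) ×
    (Option Int × Option Int × Option Int × Option Int) :=
  ((none, none, some 0, some 0), (some 0, some 0, some 0, some 0))

-- ===== CLAIM (what is proved, stated in full; the proofs are below) =====
def Claim_unchanged_find_weak_strong : Prop := ∀ (A : List (List Int)) (B : List (List Int)), Dom_find_weak_strong A B → Pre_find_weak_strong A B → Spec_find_weak_strong A B (find_weak_strong A B)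
def Claim_changed_find_weak_strong : Prop := Dom_find_weak_strong (pvDiffWitness_find_weak_strong.1) (pvDiffWitness_find_weak_strong.2) ∧ Pre_find_weak_strong (pvDiffWitness_find_weak_strong.1) (pvDiffWitness_find_weak_strong.2) ∧ D_find_weak_strong (pvDiffWitness_find_weak_strong.1) (pvDiffWitness_find_weak_strong.2) ∧ find_weak_strong (pvDiffWitness_find_weak_strong.1) (pvDiffWitness_find_weak_strong.2) = pvDiffWitnessOut_find_weak_strong.1 ∧ find_weak_strong_alt (pvDiffWitness_find_weak_strong.1) (pvDiffWitness_find_weak_strong.2) = pvDiffWitnessOut_find_weak_strong.2 ∧ pvDiffWitnessOut_find_weak_strong.1 ≠ pvDiffWitnessOut_find_weak_strong.2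
def Claim_exact_find_weak_strong : Prop := ∀ (A : List (List Int)) (B : List (List Int)), Dom_find_weak_strong A B → Pre_find_weak_strong A B → D_find_weak_strong A B → find_weak_strong A B ≠ find_weak_strong_alt A B

-- ===== LEMMAS AND PROOFS =====

-- the lexicographic value of a 4-tuple key
def pvKey4 (p : Int × Int × Int × Int) : Int ×ₗ (Int ×ₗ (Int ×ₗ Int)) :=
  toLex (p.1, toLex (p.2.1, toLex (p.2.2.1, p.2.2.2)))

theorem pvKey4_lt (p q : Int × Int × Int × Int) : pvKey4 p < pvKey4 q ↔
    (p.1 < q.1 ∨ (p.1 = q.1 ∧ (p.2.1 < q.2.1 ∨ (p.2.1 = q.2.1 ∧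
      (p.2.2.1 < q.2.2.1 ∨ (p.2.2.1 = q.2.2.1 ∧ p.2.2.2 < q.2.2.2)))))) := by
  simp [pvKey4, Prod.Lex.lt_iff]

-- first minimal element, head recursion
def pvMinR {α : Type} {κ : Type} [LinearOrder κ] (k : α → κ) : List α → Option α
  | [] => none
  | x :: t =>
    match pvMinR k t with
    | none => some x
    | some m => some (if k m < k x then m else x)

theorem pvMinR_none_iff {α κ : Type} [LinearOrder κ] (k : α → κ) (L : List α) :
    pvMinR k L = none ↔ L = [] := by
  cases L with
  | nil => simp [pvMinR]
  | cons x t =>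
    simp only [pvMinR]
    cases pvMinR k t <;> simp

theorem pvMinR_mem {α κ : Type} [LinearOrder κ] (k : α → κ) {L : List α} {m : α}
    (h : pvMinR k L = some m) : m ∈ L := by
  induction L generalizing m with
  | nil => simp [pvMinR] at h
  | cons x t ih =>
    rw [pvMinR] at h
    cases hmt : pvMinR k t with
    | none =>
      rw [hmt] at h
      simp only [Option.some.injEq] at h
      subst h; exact List.mem_cons_self
    | some m' =>
      rw [hmt] at h
      simp only [Option.some.injEq] at h
      subst h
      split
      · exact List.mem_cons_of_mem _ (ih hmt)
      · exact List.mem_cons_self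

theorem pvMinR_isMin {α κ : Type} [LinearOrder κ] (k : α → κ) {L : List α} {m : α}
    (h : pvMinR k L = some m) : ∀ y ∈ L, k m ≤ k y := by
  induction L generalizing m with
  | nil => simp [pvMinR] at h
  | cons x t ih =>
    rw [pvMinR] at h
    cases hmt : pvMinR k t with
    | none =>
      rw [hmt] at h
      simp only [Option.some.injEq] at h
      subst h
      have ht := (pvMinR_none_iff k t).mp hmt; subst ht
      simp
    | some m' =>
      rw [hmt] at h
      simp only [Option.some.injEq] at h
      subst h
      intro y hy
      have hm' := ih hmt
      rcases List.mem_cons.mp hy with rfl | hyt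
      · split
        · next hc => exact le_of_lt hc
        · exact le_refl _
      · have hyy := hm' y hyt
        split
        · exact hyy
        · next hc => exact le_trans (not_lt.mp hc) hyy

-- option-accumulator first-min step, and the two guarded tournament steps
def pvMinStep {κ : Type} [LinearOrder κ] (k : (Int × Int × Int × Int) → κ)
    (o : Option (Int × Int × Int × Int)) (x : Int × Int × Int × Int) :
    Option (Int × Int × Int × Int) :=
  match o with
  | none => some x
  | some m => some (if k x < k m then x else m)

def pvPLow (x : Int × Int × Int × Int) : Bool := decide (0 < x.1) && decide (x.1 < 1000000)
def pvPHigh (x : Int × Int × Int × Int) : Bool := decide (0 < x.1)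
def pvKW (x : Int × Int × Int × Int) := pvKey4 (x.1, -x.2.1, -(x.2.2.1 + x.2.2.2), -x.2.2.2)
def pvKS (x : Int × Int × Int × Int) := pvKey4 (-x.1, x.2.1, x.2.2.1 + x.2.2.2, x.2.2.2)
def pvLowStep (o : Option (Int × Int × Int × Int)) (x : Int × Int × Int × Int) :=
  if pvPLow x then pvMinStep pvKW o x else o
def pvHighStep (o : Option (Int × Int × Int × Int)) (x : Int × Int × Int × Int) :=
  if pvPHigh x then pvMinStep pvKS o x else o

theorem pvFoldl_flatMap {α β σ : Type} (l : List α) (f : α → List β) (g : σ → β → σ) (i : σ) :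
    (l.flatMap f).foldl g i = l.foldl (fun s x => (f x).foldl g s) i := by
  induction l generalizing i with
  | nil => rfl
  | cons x t ih => simp [List.flatMap_cons, List.foldl_append, ih]

theorem pvFoldl_guard_filter {α σ : Type} (p : α → Bool) (g : σ → α → σ) (L : List α) (i : σ) :
    L.foldl (fun s x => if p x then g s x else s) i = (L.filter p).foldl g i := by
  induction L generalizing i with
  | nil => rfl
  | cons x t ih =>
    by_cases hp : p x
    · rw [List.filter_cons_of_pos hp]; simp [hp, ih]
    · rw [List.filter_cons_of_neg hp]; simp [hp, ih]

theorem pvFoldO_some {κ : Type} [LinearOrder κ] (k : (Int × Int × Int × Int) → κ)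
    (t : List (Int × Int × Int × Int)) (b : Int × Int × Int × Int) :
    t.foldl (pvMinStep k) (some b) =
      some (t.foldl (fun best y => if k y < k best then y else best) b) := by
  induction t generalizing b with
  | nil => simp
  | cons y t' ih => simp [pvMinStep, ih]

theorem pvFold_some {α κ : Type} [LinearOrder κ] (k : α → κ) (t : List α) (b : α) :
    t.foldl (fun best y => if k y < k best then y else best) b =
      (match pvMinR k t with | none => b | some m => if k m < k b then m else b) := by
  induction t generalizing b with
  | nil => simp [pvMinR]
  | cons y t' ih =>
    rw [List.foldl_cons, ih]
    cases hmt : pvMinR k t' with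
    | none =>
      have ht := (pvMinR_none_iff k t').mp hmt; subst ht
      simp [pvMinR]
    | some m' =>
      simp only [pvMinR, hmt]
      by_cases hmy : k m' < k y
      · by_cases hyb : k y < k b
        · have hmb : k m' < k b := lt_trans hmy hyb
          simp [hmy, hyb, hmb]
        · simp [hmy, hyb]
      · have hym : k y ≤ k m' := not_lt.mp hmy
        by_cases hyb : k y < k b
        · simp [hmy, hyb]
        · have hmb : ¬ k m' < k b := not_lt.mpr (le_trans (not_lt.mp hyb) hym)
          simp [hmy, hyb, hmb]

theorem pvMinR_cons_fold {α κ : Type} [LinearOrder κ] (k : α → κ) (x : α) (t : List α) :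
    pvMinR k (x :: t) = some (t.foldl (fun best y => if k y < k best then y else best) x) := by
  rw [pvFold_some, pvMinR]
  cases pvMinR k t <;> rfl

theorem pvFoldO_none {κ : Type} [LinearOrder κ] (k : (Int × Int × Int × Int) → κ)
    (L : List (Int × Int × Int × Int)) :
    L.foldl (pvMinStep k) none = pvMinR k L := by
  cases L with
  | nil => simp [pvMinR]
  | cons x t =>
    rw [List.foldl_cons, pvMinR_cons_fold]
    exact pvFoldO_some k t x

-- the encoding of the two running minima as A's 12-variable state
def pvEncode (wo so : Option (Int × Int × Int × Int)) : PvSt :=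
  { lowAtk := match wo with | none => 1000000 | some m => m.1
    lowRecent := wo.map (fun m => m.2.1)
    lowRpc := wo.map (fun m => m.2.2.1 + m.2.2.2)
    lowCol := wo.map (fun m => m.2.2.2)
    wr := wo.map (fun m => m.2.2.1)
    wc := wo.map (fun m => m.2.2.2)
    highAtk := match so with | none => -1 | some m => m.1
    highOld := so.map (fun m => m.2.1)
    highRpc := so.map (fun m => m.2.2.1 + m.2.2.2)
    highCol := so.map (fun m => m.2.2.2)
    sr := so.map (fun m => m.2.2.1)
    sc := so.map (fun m => m.2.2.2) }

def pvInvLow (wo : Option (Int × Int × Int × Int)) : Prop :=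
  ∀ m, wo = some m → 0 < m.1 ∧ m.1 < 1000000
def pvInvHigh (so : Option (Int × Int × Int × Int)) : Prop :=
  ∀ m, so = some m → 0 < m.1

-- the two halves of A's loop body (pvStepA is definitionally their composition)
def pvHighHalf (s : PvSt) (a b r c : Int) : PvSt :=
  if a > s.highAtk then
    { s with highAtk := a, highOld := some b, highRpc := some (r + c), highCol := some c,
             sr := some r, sc := some c }
  else if a = s.highAtk then
    match s.highOld, s.highRpc, s.highCol with
    | some t, some q, some k =>
      if b < t then
        { s with highAtk := a, highOld := some b, highRpc := some (r + c), highCol := some c,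
                 sr := some r, sc := some c }
      else if b = t then
        if r + c < q then
          { s with highAtk := a, highOld := some b, highRpc := some (r + c), highCol := some c,
                   sr := some r, sc := some c }
        else if r + c = q then
          if c < k then
            { s with highAtk := a, highOld := some b, highRpc := some (r + c), highCol := some c,
                     sr := some r, sc := some c }
          else s
        else s
      else s
    | _, _, _ => s
  else s

def pvLowHalf (s1 : PvSt) (a b r c : Int) : PvSt :=
  if a < s1.lowAtk then
    { s1 with lowAtk := a, lowRecent := some b, lowRpc := some (r + c), lowCol := some c,
              wr := some r, wc := some c }
  else if a = s1.lowAtk then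
    match s1.lowRecent, s1.lowRpc, s1.lowCol with
    | some t, some q, some k =>
      if b > t then
        { s1 with lowAtk := a, lowRecent := some b, lowRpc := some (r + c), lowCol := some c,
                  wr := some r, wc := some c }
      else if b = t then
        if q < r + c then
          { s1 with lowAtk := a, lowRecent := some b, lowRpc := some (r + c), lowCol := some c,
                    wr := some r, wc := some c }
        else if q = r + c then
          if k < c then
            { s1 with lowAtk := a, lowRecent := some b, lowRpc := some (r + c), lowCol := some c,
                      wr := some r, wc := some c }
          else s1
        else s1
      else s1
    | _, _, _ => s1
  else s1

theorem pvStepA_eq (s : PvSt) (a b r c : Int) :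
    pvStepA s a b r c = if a > 0 then pvLowHalf (pvHighHalf s a b r c) a b r c else s := rfl

set_option maxHeartbeats 1000000 in
theorem pvHighHalf_encode (wo so : Option (Int × Int × Int × Int)) (hs : pvInvHigh so)
    (a b r c : Int) (ha : 0 < a) :
    pvHighHalf (pvEncode wo so) a b r c = pvEncode wo (pvMinStep pvKS so (a, b, r, c)) := by
  cases so with
  | none =>
    have h : a > (pvEncode wo none).highAtk := by simp [pvEncode]; omega
    rw [pvHighHalf, if_pos h]
    simp [pvEncode, pvMinStep]
  | some n =>
    rcases n with ⟨n1, n2, n3, n4⟩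
    have hn : (0:Int) < n1 := hs _ rfl
    rw [pvHighHalf]
    simp only [pvEncode, pvMinStep, Option.map]
    simp only [pvKS, pvKey4_lt]
    split_ifs <;>
      first
        | rfl
        | (simp only [PvSt.mk.injEq, Option.some.injEq]; omega)
        | (exfalso; omega)

set_option maxHeartbeats 1000000 in
theorem pvLowHalf_encode (wo so : Option (Int × Int × Int × Int)) (hw : pvInvLow wo)
    (a b r c : Int) (ha : 0 < a) :
    pvLowHalf (pvEncode wo so) a b r c =
      pvEncode (if a < 1000000 then pvMinStep pvKW wo (a, b, r, c) else wo) so := by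
  cases wo with
  | none =>
    rw [pvLowHalf]
    simp only [pvEncode, pvMinStep, Option.map]
    split_ifs <;>
      first
        | rfl
        | (simp only [PvSt.mk.injEq, Option.some.injEq]; omega)
        | (exfalso; omega)
  | some m =>
    rcases m with ⟨m1, m2, m3, m4⟩
    obtain ⟨hm1, hm2⟩ : (0:Int) < m1 ∧ m1 < 1000000 := by simpa using hw _ rfl
    rw [pvLowHalf]
    simp only [pvEncode, pvMinStep, Option.map]
    simp only [pvKW, pvKey4_lt]
    split_ifs <;>
      first
        | rfl
        | (simp only [PvSt.mk.injEq, Option.some.injEq]; omega)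
        | (exfalso; omega)

theorem pvLowStep_inv (wo : Option (Int × Int × Int × Int)) (hw : pvInvLow wo)
    (x : Int × Int × Int × Int) : pvInvLow (pvLowStep wo x) := by
  intro m' h
  rw [pvLowStep] at h
  by_cases hg : pvPLow x = true
  · rw [if_pos hg] at h
    have hx : 0 < x.1 ∧ x.1 < 1000000 := by
      simpa [pvPLow, decide_eq_true_eq, Bool.and_eq_true] using hg
    cases wo with
    | none =>
      simp only [pvMinStep, Option.some.injEq] at h; subst h; exact hx
    | some m =>
      simp only [pvMinStep, Option.some.injEq] at h
      split at h
      · subst h; exact hx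
      · subst h; exact hw m rfl
  · rw [if_neg hg] at h; exact hw m' h

theorem pvHighStep_inv (so : Option (Int × Int × Int × Int)) (hs : pvInvHigh so)
    (x : Int × Int × Int × Int) : pvInvHigh (pvHighStep so x) := by
  intro m' h
  rw [pvHighStep] at h
  by_cases hg : pvPHigh x = true
  · rw [if_pos hg] at h
    have hx : 0 < x.1 := by simpa [pvPHigh] using hg
    cases so with
    | none => simp only [pvMinStep, Option.some.injEq] at h; subst h; exact hx
    | some n =>
      simp only [pvMinStep, Option.some.injEq] at h
      split at h
      · subst h; exact hx
      · subst h; exact hs n rfl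
  · rw [if_neg hg] at h; exact hs m' h

theorem pvStep_encode (wo so : Option (Int × Int × Int × Int))
    (hw : pvInvLow wo) (hs : pvInvHigh so) (x : Int × Int × Int × Int) :
    pvStepA (pvEncode wo so) x.1 x.2.1 x.2.2.1 x.2.2.2 =
      pvEncode (pvLowStep wo x) (pvHighStep so x) := by
  rcases x with ⟨a, b, r, c⟩
  rw [pvStepA_eq]
  by_cases ha : a > 0
  · rw [if_pos ha]
    have hhs : pvHighStep so (a, b, r, c) = pvMinStep pvKS so (a, b, r, c) := by
      simp [pvHighStep, pvPHigh, ha]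
    have hls : pvLowStep wo (a, b, r, c) =
        (if a < 1000000 then pvMinStep pvKW wo (a, b, r, c) else wo) := by
      by_cases hl : a < 1000000
      · rw [if_pos hl]
        simp [pvLowStep, pvPLow, ha, hl]
      · rw [if_neg hl]
        simp [pvLowStep, pvPLow]
        intro h; omega
    rw [pvHighHalf_encode wo so hs a b r c ha,
        pvLowHalf_encode wo (pvMinStep pvKS so (a, b, r, c)) hw a b r c ha, hls, hhs]
  · rw [if_neg ha]
    have h1 : pvLowStep wo (a, b, r, c) = wo := by
      simp [pvLowStep, pvPLow, pvMinStep]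
      intro h; omega
    have h2 : pvHighStep so (a, b, r, c) = so := by
      simp [pvHighStep, pvPHigh, pvMinStep]
      omega
    rw [h1, h2]

theorem pvFold_encode (L : List (Int × Int × Int × Int)) (wo so : Option (Int × Int × Int × Int))
    (hw : pvInvLow wo) (hs : pvInvHigh so) :
    L.foldl (fun s x => pvStepA s x.1 x.2.1 x.2.2.1 x.2.2.2) (pvEncode wo so) =
      pvEncode (L.foldl pvLowStep wo) (L.foldl pvHighStep so) := by
  induction L generalizing wo so with
  | nil => rfl
  | cons x t ih =>
    simp only [List.foldl_cons]
    rw [pvStep_encode wo so hw hs x]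
    exact ih _ _ (pvLowStep_inv wo hw x) (pvHighStep_inv so hs x)

-- the cell enumeration both ports traverse
def pvCells (A B : List (List Int)) : List (Int × Int × Int × Int) :=
  (PySem.List.pyRange 0 A.length 1).flatMap (fun r =>
    (PySem.List.pyRange 0 ((pvRow A 0).length) 1).flatMap (fun c =>
      [(pvCell A r c, pvCell B r c, r, c)]))

theorem pv_mem_cells (A B : List (List Int)) (x : Int × Int × Int × Int) :
    x ∈ pvCells A B ↔ ∃ r c : Int, 0 ≤ r ∧ r < A.length ∧ 0 ≤ c ∧ c < (pvRow A 0).length ∧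
      x = (pvCell A r c, pvCell B r c, r, c) := by
  simp only [pvCells, List.mem_flatMap, PySem.List.mem_pyRange_one, List.mem_singleton]
  constructor
  · rintro ⟨r, ⟨h0, h1⟩, c, ⟨h2, h3⟩, h4⟩
    exact ⟨r, c, h0, h1, h2, h3, h4⟩
  · rintro ⟨r, c, h0, h1, h2, h3, h4⟩
    exact ⟨r, ⟨h0, h1⟩, c, ⟨h2, h3⟩, h4⟩

theorem pvRow_zero (A : List (List Int)) : pvRow A 0 = A.headD [] := by
  cases A <;> simp [pvRow, PySem.List.pyGet?_zero]

theorem pvKW_fst_le {a b : Int × Int × Int × Int} (h : pvKW a ≤ pvKW b) : a.1 ≤ b.1 := by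
  simp only [pvKW, pvKey4] at h
  rcases Prod.Lex.le_iff.mp h with h1 | ⟨h1, _⟩
  · exact le_of_lt h1
  · exact le_of_eq h1

theorem pvLowSplit (A B : List (List Int)) :
    (pvCells A B).filter pvPLow =
      ((pvCells A B).filter pvPHigh).filter (fun x => decide (x.1 < 1000000)) := by
  rw [List.filter_filter]
  apply List.filter_congr
  intro x _
  by_cases h1 : (0:Int) < x.1 <;> by_cases h2 : x.1 < (1000000:Int) <;>
    simp [pvPLow, pvPHigh, h1, h2]

theorem pvA_eq (A B : List (List Int)) :
    find_weak_strong A B =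
      ( (pvMinR pvKW ((pvCells A B).filter pvPLow)).map (fun m => m.2.2.1),
        (pvMinR pvKW ((pvCells A B).filter pvPLow)).map (fun m => m.2.2.2),
        (pvMinR pvKS ((pvCells A B).filter pvPHigh)).map (fun m => m.2.2.1),
        (pvMinR pvKS ((pvCells A B).filter pvPHigh)).map (fun m => m.2.2.2) ) := by
  have h := pvFold_encode (pvCells A B) none none (fun m h => by cases h) (fun m h => by cases h)
  have hflat : (pvCells A B).foldl (fun s x => pvStepA s x.1 x.2.1 x.2.2.1 x.2.2.2)
        (pvEncode none none)
      = (PySem.List.pyRange 0 A.length 1).foldl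
          (fun s r => (PySem.List.pyRange 0 ((pvRow A 0).length) 1).foldl
            (fun s c => pvStepA s (pvCell A r c) (pvCell B r c) r c) s) (pvEncode none none) := by
    simp only [pvCells, pvFoldl_flatMap, List.foldl_cons, List.foldl_nil]
  have hlow : (pvCells A B).foldl pvLowStep none =
      pvMinR pvKW ((pvCells A B).filter pvPLow) := by
    rw [show (pvCells A B).foldl pvLowStep (none : Option (Int × Int × Int × Int)) =
        (pvCells A B).foldl (fun o x => if pvPLow x then pvMinStep pvKW o x else o) none from rfl,
      pvFoldl_guard_filter, pvFoldO_none]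
  have hhigh : (pvCells A B).foldl pvHighStep none =
      pvMinR pvKS ((pvCells A B).filter pvPHigh) := by
    rw [show (pvCells A B).foldl pvHighStep (none : Option (Int × Int × Int × Int)) =
        (pvCells A B).foldl (fun o x => if pvPHigh x then pvMinStep pvKS o x else o) none from rfl,
      pvFoldl_guard_filter, pvFoldO_none]
  rw [hlow, hhigh] at h
  simp only [find_weak_strong]
  rw [show (⟨1000000, none, none, none, none, none, -1, none, none, none, none, none⟩ : PvSt) =
      pvEncode none none from rfl, ← hflat, h]
  rfl

-- a cell of the grid with a given Nat index pair is in pvCells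
theorem pv_cell_mem (A B : List (List Int)) (r c : Nat)
    (hr : r < A.length) (hc : c < (pvRow A 0).length) :
    (pvCell A r c, pvCell B r c, (r : Int), (c : Int)) ∈ pvCells A B := by
  rw [pv_mem_cells]
  exact ⟨r, c, by positivity, by exact_mod_cast hr, by positivity, by exact_mod_cast hc, rfl⟩

-- under Pre_ and ¬D_, when the candidate list is nonempty some candidate is below the sentinel
theorem pv_low_exists (A B : List (List Int)) (hpre : Pre_find_weak_strong A B)
    (hnd : ¬ D_find_weak_strong A B) {x : Int × Int × Int × Int}
    {t : List (Int × Int × Int × Int)}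
    (hc : (pvCells A B).filter pvPHigh = x :: t) :
    ∃ y ∈ (pvCells A B).filter pvPHigh, y.1 < 1000000 := by
  have hW : (A.headD []).length = (pvRow A 0).length := by rw [pvRow_zero]
  have hx : x ∈ (pvCells A B).filter pvPHigh := by rw [hc]; exact List.mem_cons_self
  have hx2 := List.mem_filter.mp hx
  obtain ⟨rI, cI, hr0, hr1, hc0, hc1, hxeq⟩ := (pv_mem_cells A B x).mp hx2.1
  have hxpos : 0 < pvCell A rI cI := by
    have := hx2.2
    rw [hxeq] at this
    simpa [pvPHigh] using this
  have hpos : ∃ r ∈ List.range A.length, ∃ c ∈ List.range (A.headD []).length,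
      0 < pvCell A r c := by
    refine ⟨rI.toNat, ?_, cI.toNat, ?_, ?_⟩
    · rw [List.mem_range]; omega
    · rw [List.mem_range, hW]; omega
    · rw [Int.toNat_of_nonneg hr0, Int.toNat_of_nonneg hc0]; exact hxpos
  have hsmall : ∃ r ∈ List.range A.length, ∃ c ∈ List.range (A.headD []).length,
      0 < pvCell A r c ∧ pvCell A r c ≤ 1000000 := by
    by_contra hno
    apply hnd
    refine ⟨hpos, ?_⟩
    intro r hr c hcc hp
    by_contra hbig
    exact hno ⟨r, hr, c, hcc, hp, by omega⟩
  obtain ⟨r, hr, c, hcc, hp, hle⟩ := hsmall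
  rw [List.mem_range] at hr hcc
  by_cases hlt : pvCell A r c < 1000000
  · refine ⟨(pvCell A r c, pvCell B r c, (r : Int), (c : Int)), ?_, hlt⟩
    exact List.mem_filter.mpr ⟨pv_cell_mem A B r c hr (hW ▸ hcc), by simpa [pvPHigh] using hp⟩
  · have heq : pvCell A r c = 1000000 := by omega
    obtain ⟨r', hr', c', hcc', _, hp', hlt'⟩ :=
      hpre.2.2 r (List.mem_range.mpr hr) c (List.mem_range.mpr hcc) heq
    rw [List.mem_range] at hr' hcc'
    refine ⟨(pvCell A r' c', pvCell B r' c', (r' : Int), (c' : Int)), ?_, hlt'⟩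
    exact List.mem_filter.mpr ⟨pv_cell_mem A B r' c' hr' (hW ▸ hcc'), by simpa [pvPHigh] using hp'⟩

-- B-side: the embedding of A's 4-tuple candidates into Source B's 5-tuples
def pvPhi (x : Int × Int × Int × Int) : Int × Int × Int × Int × Int :=
  (-x.1, x.2.1, x.2.2.1 + x.2.2.2, x.2.2.2, x.2.2.1)

theorem pvKey5_lt (p q : Int × Int × Int × Int × Int) : pvKey5 p < pvKey5 q ↔
    (p.1 < q.1 ∨ (p.1 = q.1 ∧ (p.2.1 < q.2.1 ∨ (p.2.1 = q.2.1 ∧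
      (p.2.2.1 < q.2.2.1 ∨ (p.2.2.1 = q.2.2.1 ∧
        (p.2.2.2.1 < q.2.2.2.1 ∨ (p.2.2.2.1 = q.2.2.2.1 ∧ p.2.2.2.2 < q.2.2.2.2)))))))) := by
  simp [pvKey5, Prod.Lex.lt_iff]

theorem pvKS_lt_phi (x y : Int × Int × Int × Int) :
    pvKS x < pvKS y ↔ pvKey5 (pvPhi x) < pvKey5 (pvPhi y) := by
  simp only [pvKS, pvKey4_lt, pvPhi, pvKey5_lt]
  omega

theorem pvKW_lt_phi (x y : Int × Int × Int × Int) :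
    pvKW x < pvKW y ↔ pvKey5 (pvPhi y) < pvKey5 (pvPhi x) := by
  simp only [pvKW, pvKey4_lt, pvPhi, pvKey5_lt]
  omega

theorem pvKS_inj {x y : Int × Int × Int × Int} (h : pvKS x = pvKS y) : x = y := by
  rcases x with ⟨a, b, r, c⟩; rcases y with ⟨a', b', r', c'⟩
  simp only [pvKS, pvKey4, toLex_inj, Prod.mk.injEq] at h
  simp only [Prod.mk.injEq]
  omega

theorem pvKW_inj {x y : Int × Int × Int × Int} (h : pvKW x = pvKW y) : x = y := by
  rcases x with ⟨a, b, r, c⟩; rcases y with ⟨a', b', r', c'⟩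
  simp only [pvKW, pvKey4, toLex_inj, Prod.mk.injEq] at h
  simp only [Prod.mk.injEq]
  omega

-- in a key-sorted list the last element has maximal key
theorem pv_pairwise_getLast {α κ : Type} [Preorder κ] (k : α → κ) {L : List α}
    (hp : L.Pairwise (fun a b => k a ≤ k b)) (h : L ≠ []) :
    ∀ y ∈ L, k y ≤ k (L.getLast h) := by
  intro y hy
  obtain ⟨i, hi, rfl⟩ := List.mem_iff_getElem.mp hy
  rw [List.getLast_eq_getElem]
  rcases Nat.lt_or_ge i (L.length - 1) with hlt | hge
  · exact List.pairwise_iff_getElem.mp hp i (L.length - 1) hi (by omega) hlt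
  · have hieq : i = L.length - 1 := by omega
    subst hieq
    exact le_refl _

-- Source B's candidate list is the φ-image of the positive-cell sublist of pvCells
theorem pvCand5_eq (A B : List (List Int)) :
    ((PySem.List.pyRange 0 A.length 1).flatMap (fun r =>
      (PySem.List.pyRange 0 ((pvRow A 0).length) 1).flatMap (fun c =>
        let a := pvCell A r c
        if a > 0 then [(-a, pvCell B r c, r + c, c, r)] else []))) =
      ((pvCells A B).filter pvPHigh).map pvPhi := by
  simp only [pvCells, List.filter_flatMap, List.map_flatMap]
  congr 1
  funext r
  congr 1
  funext c
  by_cases h : (0:Int) < pvCell A r c <;> simp [pvPHigh, pvPhi, h]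

-- cand[0]/cand[-1] of a nonempty list
theorem pvPick_ne_nil {L : List (Int × Int × Int × Int × Int)} (h : L ≠ []) :
    pvPick L = (some ((L.getLast h).2.2.2.2), some ((L.getLast h).2.2.2.1),
                some ((L.head h).2.2.2.2), some ((L.head h).2.2.2.1)) := by
  cases L with
  | nil => exact absurd rfl h
  | cons a t => rfl

-- ===== VERDICT (by name: the statement is the Claim_ definition above) =====
theorem find_weak_strong_spec : Claim_unchanged_find_weak_strong := by
  intro A B _ hpre hnd
  rw [pvA_eq]
  show _ = find_weak_strong_alt A B
  simp only [find_weak_strong_alt]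
  rw [pvCand5_eq]
  cases hc : (pvCells A B).filter pvPHigh with
  | nil =>
    rw [pvLowSplit, hc]
    simp [pvMinR, pvPick, PySem.List.sorted]
  | cons x t =>
    rw [pvLowSplit, hc]
    set L := PySem.List.sorted ((x :: t).map pvPhi) pvKey5 false with hL
    have hLne : L ≠ [] := by
      rw [hL]
      intro hnil
      rw [PySem.List.sorted_eq_nil_iff] at hnil
      simp at hnil
    -- A's strong minimum exists
    obtain ⟨s, hs⟩ : ∃ s, pvMinR pvKS (x :: t) = some s := by
      cases h : pvMinR pvKS (x :: t) with
      | none => exact absurd ((pvMinR_none_iff _ _).mp h) (by simp)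
      | some s => exact ⟨s, rfl⟩
    have hsmem : s ∈ x :: t := pvMinR_mem _ hs
    have hsmin := pvMinR_isMin _ hs
    -- head of the sorted list is φ of A's strong
    have hcons : PySem.List.sorted ((x :: t).map pvPhi) pvKey5 false = L.head hLne :: L.tail := by
      rw [← hL]; exact (List.cons_head_tail hLne).symm
    have hhead : ∀ y ∈ (x :: t).map pvPhi, pvKey5 (L.head hLne) ≤ pvKey5 y :=
      PySem.List.key_head_sorted_le _ _ hcons
    have hheadmem : L.head hLne ∈ (x :: t).map pvPhi :=
      (PySem.List.mem_sorted _ _ _ _).mp (List.head_mem hLne)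
    obtain ⟨x0, hx0mem, hx0eq⟩ := List.mem_map.mp hheadmem
    have hle1 : pvKey5 (pvPhi x0) ≤ pvKey5 (pvPhi s) := by
      rw [hx0eq]
      exact hhead _ (List.mem_map_of_mem hsmem)
    have hx0s : x0 = s := by
      apply pvKS_inj
      have hle2 : pvKS s ≤ pvKS x0 := hsmin x0 hx0mem
      rcases lt_or_eq_of_le hle2 with hlt | heq
      · exact absurd (lt_of_lt_of_le ((pvKS_lt_phi s x0).mp hlt) hle1) (lt_irrefl _)
      · exact heq.symm
    have hh0 : L.head hLne = pvPhi s := by rw [← hx0eq, hx0s]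
    -- last of the sorted list is φ of the pvKW-minimum over all positives
    have hpair : L.Pairwise (fun a b => pvKey5 a ≤ pvKey5 b) :=
      PySem.List.sorted_pairwise _ _
    have hwmax : ∀ y ∈ L, pvKey5 y ≤ pvKey5 (L.getLast hLne) :=
      pv_pairwise_getLast pvKey5 hpair hLne
    have hwmemL : L.getLast hLne ∈ (x :: t).map pvPhi :=
      (PySem.List.mem_sorted _ _ _ _).mp (List.getLast_mem hLne)
    obtain ⟨w0, hw0mem, hw0eq⟩ := List.mem_map.mp hwmemL
    have hwmin4 : ∀ y ∈ x :: t, pvKW w0 ≤ pvKW y := by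
      intro y hy
      by_contra hnle
      have hlt : pvKW y < pvKW w0 := not_le.mp hnle
      have h5 : pvKey5 (pvPhi w0) < pvKey5 (pvPhi y) := (pvKW_lt_phi y w0).mp hlt
      have hmem5 : pvPhi y ∈ L :=
        (PySem.List.mem_sorted _ _ _ _).mpr (List.mem_map_of_mem hy)
      have := hwmax _ hmem5
      rw [hw0eq] at h5
      exact absurd (lt_of_lt_of_le h5 this) (lt_irrefl _)
    -- w0 lies in the low filter
    obtain ⟨ylow, hylowmem, hylowlt⟩ := pv_low_exists A B hpre hnd hc
    rw [hc] at hylowmem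
    have hw0low : w0.1 < 1000000 :=
      lt_of_le_of_lt (pvKW_fst_le (hwmin4 ylow hylowmem)) hylowlt
    have hw0f : w0 ∈ (x :: t).filter (fun z => decide (z.1 < 1000000)) :=
      List.mem_filter.mpr ⟨hw0mem, by simpa using hw0low⟩
    -- A's weak minimum equals w0
    obtain ⟨m, hm⟩ : ∃ m, pvMinR pvKW ((x :: t).filter (fun z => decide (z.1 < 1000000))) = some m := by
      cases h : pvMinR pvKW ((x :: t).filter (fun z => decide (z.1 < 1000000))) with
      | none =>
        rw [pvMinR_none_iff] at h
        rw [h] at hw0f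
        cases hw0f
      | some m => exact ⟨m, rfl⟩
    have hmw0 : m = w0 := by
      apply pvKW_inj
      exact le_antisymm (pvMinR_isMin _ hm w0 hw0f)
        (hwmin4 m (List.mem_of_mem_filter (pvMinR_mem _ hm)))
    -- assemble
    rw [hs, hm, hmw0, pvPick_ne_nil hLne, hh0, ← hw0eq]
    simp [pvPhi]

theorem find_weak_strong_tight : Claim_exact_find_weak_strong := by
  intro A B _ hpre hd
  have hW : (A.headD []).length = (pvRow A 0).length := by rw [pvRow_zero]
  -- the low filter is empty: every positive cell exceeds the sentinel
  have hLempty : (pvCells A B).filter pvPLow = [] := by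
    rw [List.filter_eq_nil_iff]
    intro y hy
    obtain ⟨rI, cI, hr0, hr1, hc0, hc1, hyeq⟩ := (pv_mem_cells A B y).mp hy
    intro hpy
    have hx : 0 < y.1 ∧ y.1 < 1000000 := by
      simpa [pvPLow, decide_eq_true_eq, Bool.and_eq_true] using hpy
    have hbig := hd.2 rI.toNat (by rw [List.mem_range]; omega) cI.toNat
      (by rw [List.mem_range, hW]; omega)
    rw [Int.toNat_of_nonneg hr0, Int.toNat_of_nonneg hc0] at hbig
    have : 1000000 < pvCell A rI cI := hbig (by rw [hyeq] at hx; exact hx.1)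
    rw [hyeq] at hx
    simp at hx
    omega
  -- the candidate list is nonempty: D_ provides a positive cell
  obtain ⟨r, hr, c, hcc, hp⟩ := hd.1
  rw [List.mem_range] at hr hcc
  have hmem : (pvCell A r c, pvCell B r c, (r : Int), (c : Int)) ∈
      (pvCells A B).filter pvPHigh :=
    List.mem_filter.mpr ⟨pv_cell_mem A B r c hr (hW ▸ hcc), by simpa [pvPHigh] using hp⟩
  cases hc2 : (pvCells A B).filter pvPHigh with
  | nil => rw [hc2] at hmem; cases hmem
  | cons x t =>
    intro heq
    rw [pvA_eq, hLempty] at heq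
    have hB : find_weak_strong_alt A B =
        pvPick (PySem.List.sorted ((x :: t).map pvPhi) pvKey5 false) := by
      simp only [find_weak_strong_alt]
      rw [pvCand5_eq, hc2]
    have hLne : PySem.List.sorted ((x :: t).map pvPhi) pvKey5 false ≠ [] := by
      intro hnil
      rw [PySem.List.sorted_eq_nil_iff] at hnil
      simp at hnil
    rw [hB, pvPick_ne_nil hLne] at heq
    simp [pvMinR] at heq

theorem find_weak_strong_changed : Claim_changed_find_weak_strong := by
  unfold Claim_changed_find_weak_strong; decide
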